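-- pv_equiv track=rewrite | github.com/samuel871211/My-python-code | codesignal/electionsWinners.py | electionsWinners
-- ===== SOURCE A (Python) =====
-- def electionsWinners(a,k):
--     a = sorted(a)
--     for i in range(len(a)):
--         if a[i] + k > a[-1]:
--             return len(a)-i
--     if a[-1] > a[-2]:
--         return 1
--     return 0
-- ===== SOURCE B (Python) =====
-- def electionsWinners(a, k):
--     m = max(a)
--     if k > 0:
--         return sum(1 for x in a if x + k > m)
--     return 1 if a.count(m) == 1 else 0
-- ===== Notes on version B (the rewrite author's own statement) =====
-- stated objective: faster
-- what changed: Replaces sort-then-scan with a single-pass max plus a count of elements beating max-k (and a count-of-max tie check for k<=0), removing the O(n log n) sort.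
import Mathlib
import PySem

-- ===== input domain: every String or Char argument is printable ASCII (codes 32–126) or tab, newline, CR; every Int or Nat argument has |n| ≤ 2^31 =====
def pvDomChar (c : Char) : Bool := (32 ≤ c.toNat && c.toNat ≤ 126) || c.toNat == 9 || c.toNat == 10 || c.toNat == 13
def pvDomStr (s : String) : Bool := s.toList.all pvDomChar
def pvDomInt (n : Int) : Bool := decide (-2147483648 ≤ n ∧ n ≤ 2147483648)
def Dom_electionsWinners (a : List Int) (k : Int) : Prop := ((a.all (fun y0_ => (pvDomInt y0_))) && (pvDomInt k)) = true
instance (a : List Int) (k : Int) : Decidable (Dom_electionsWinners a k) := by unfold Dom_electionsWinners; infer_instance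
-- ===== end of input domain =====

-- B replaces A's sort-then-scan by a single pass: max, then a count of elements with x + k > max
-- (tie check on the multiplicity of the max when k <= 0).

-- ===== PORT A =====
-- for i in range(len(a)): if a[i] + k > a[-1]: return len(a)-i   (walk with running index i)
def ewLoopA (k last : Int) (n : Nat) : List Int → Nat → Option Int
  | [], _ => none
  | x :: xs, i => if x + k > last then some ((n : Int) - (i : Int)) else ewLoopA k last n xs (i + 1)

def electionsWinners (a : List Int) (k : Int) : Int :=
  let s := PySem.List.sorted a (fun x => x)
  match ewLoopA k (PySem.List.pyGetD s (-1) 0) s.length s 0 with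
  | some r => r
  | none => if PySem.List.pyGetD s (-1) 0 > PySem.List.pyGetD s (-2) 0 then 1 else 0

-- ===== PORT B =====
def electionsWinners_alt (a : List Int) (k : Int) : Int :=
  let m := (PySem.List.max? a (fun x => x)).getD 0
  if k > 0 then a.foldl (fun acc x => if x + k > m then acc + 1 else acc) 0
  else if PySem.List.count a m = 1 then 1 else 0

-- ===== PRECONDITION & SPEC =====
-- Pre_ excludes exactly the inputs where A raises IndexError: the empty list (a[-1]),
-- and a singleton list with k <= 0 (a[-2]).
def Pre_electionsWinners (a : List Int) (k : Int) : Prop := a ≠ [] ∧ (k ≤ 0 → 2 ≤ a.length)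
instance (a : List Int) (k : Int) : Decidable (Pre_electionsWinners a k) := by unfold Pre_electionsWinners; infer_instance
def pvWitness_electionsWinners : List Int × Int := ([2, 3, 1, 2], 2)

def Spec_electionsWinners (a : List Int) (k : Int) (out : Int) : Prop := out = electionsWinners_alt a k
instance (a : List Int) (k : Int) (out : Int) : Decidable (Spec_electionsWinners a k out) := by unfold Spec_electionsWinners; infer_instance

-- ===== CLAIM (what is proved, stated in full; the proofs are below) =====
def Claim_equal_electionsWinners : Prop := ∀ (a : List Int) (k : Int), Dom_electionsWinners a k → Pre_electionsWinners a k → Spec_electionsWinners a k (electionsWinners a k)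
-- ===== LEMMAS AND PROOFS =====

-- in a ≤-sorted list, the last element is maximal
lemma pv_last_ge (t : List Int) (ht : t ≠ []) (hp : t.Pairwise (· ≤ ·)) :
    ∀ x ∈ t, x ≤ t.getLast ht := by
  induction t with
  | nil => simp at ht
  | cons y ys ih =>
    intro x hx
    rcases List.pairwise_cons.mp hp with ⟨hy, hys⟩
    cases ys with
    | nil => simp at hx; simp [hx]
    | cons z zs =>
      rw [List.getLast_cons (by simp)]
      rcases List.mem_cons.mp hx with rfl | hx
      · exact le_trans (hy z (by simp)) (ih (by simp) hys z (by simp))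
      · exact ih (by simp) hys x hx

lemma pv_ewLoopA_eq (k m : Int) (n : Nat) :
    ∀ (t : List Int) (i : Nat), t.Pairwise (· ≤ ·) → i + t.length = n →
    ewLoopA k m n t i =
      if t.countP (fun x => decide (x + k > m)) = 0 then none
      else some ((t.countP (fun x => decide (x + k > m)) : Int)) := by
  intro t
  induction t with
  | nil => intro i _ _; simp [ewLoopA]
  | cons x xs ih =>
    intro i hp hn
    rcases List.pairwise_cons.mp hp with ⟨hx, hxs⟩
    by_cases h : x + k > m
    · have hall : (x :: xs).countP (fun y => decide (y + k > m)) = (x :: xs).length := by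
        apply List.countP_eq_length.mpr
        intro y hy
        rcases List.mem_cons.mp hy with rfl | hy
        · simpa using h
        · have := hx y hy
          simp only [decide_eq_true_eq]; omega
      rw [ewLoopA, if_pos h, hall]
      simp only [List.length_cons] at hn ⊢
      rw [if_neg (by omega)]
      congr 1
      omega
    · have hcnt : (x :: xs).countP (fun y => decide (y + k > m)) = xs.countP (fun y => decide (y + k > m)) := by
        rw [List.countP_cons]
        simp [h]
      rw [ewLoopA, if_neg h, ih (i + 1) hxs (by simp at hn ⊢; omega), hcnt]

lemma pv_foldl_count (p : Int → Prop) [DecidablePred p] (l : List Int) (acc : Int) :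
    l.foldl (fun acc x => if p x then acc + 1 else acc) acc = acc + (l.countP (fun x => decide (p x)) : Int) := by
  induction l generalizing acc with
  | nil => simp
  | cons x xs ih =>
    rw [List.foldl_cons, List.countP_cons, ih]
    by_cases h : p x
    · simp only [h, decide_true, if_true]
      push_cast
      ring
    · simp only [h, decide_false, if_false]
      push_cast
      ring

theorem electionsWinners_spec : Claim_equal_electionsWinners := by
  intro a k _ hpre
  rcases hpre with ⟨hne, hk2⟩
  -- B's m = max of a
  obtain ⟨mv, hmv⟩ : ∃ mv, PySem.List.max? a (fun x => x) = some mv := by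
    cases h : PySem.List.max? a (fun x => x) with
    | none => exact absurd ((PySem.List.max?_eq_none_iff a (fun x => x)).mp h) hne
    | some mv => exact ⟨mv, rfl⟩
  have hmv_mem : mv ∈ a := PySem.List.max?_mem hmv
  have hmv_max : ∀ y ∈ a, y ≤ mv := fun y hy => PySem.List.max?_isMax hmv y hy
  unfold Spec_electionsWinners electionsWinners electionsWinners_alt
  simp only [hmv, Option.getD_some]
  generalize hgs : PySem.List.sorted a (fun x => x) = s
  have hsne : s ≠ [] := by
    rw [← hgs]; intro h; exact hne ((PySem.List.sorted_eq_nil_iff a (fun x => x) false).mp h)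
  have hperm : s.Perm a := hgs ▸ PySem.List.sorted_perm a (fun x => x) false
  have hpw : s.Pairwise (· ≤ ·) := hgs ▸ PySem.List.sorted_pairwise a (fun x => x)
  -- last element of s equals mv
  have hlast_mem : s.getLast hsne ∈ a := hperm.mem_iff.mp (List.getLast_mem hsne)
  have hlast_eq : s.getLast hsne = mv := by
    have h1 : s.getLast hsne ≤ mv := hmv_max _ hlast_mem
    have h2 : mv ≤ s.getLast hsne := pv_last_ge s hsne hpw mv (hperm.mem_iff.mpr hmv_mem)
    omega
  rw [PySem.List.pyGetD_neg_one s 0 hsne, hlast_eq]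
  rw [pv_ewLoopA_eq k mv s.length s 0 hpw (by simp)]
  have hcntP : s.countP (fun x => decide (x + k > mv)) = a.countP (fun x => decide (x + k > mv)) :=
    hperm.countP_eq _
  rw [hcntP]
  by_cases hkpos : k > 0
  · -- the count is positive: mv itself satisfies mv + k > mv
    have hpos : a.countP (fun x => decide (x + k > mv)) ≠ 0 := by
      have := List.countP_pos_iff.mpr (⟨mv, hmv_mem, by simp; omega⟩ : ∃ x ∈ a, (fun x => decide (x + k > mv)) x = true)
      omega
    rw [if_neg hpos, if_pos hkpos, pv_foldl_count (fun x => x + k > mv) a 0]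
    simp only [zero_add]
  · -- k ≤ 0: no element can beat the max, the loop falls through
    have hzero : a.countP (fun x => decide (x + k > mv)) = 0 := by
      apply List.countP_eq_zero.mpr
      intro x hx
      have := hmv_max x hx
      simp only [decide_eq_true_eq]
      omega
    rw [if_pos hzero, if_neg hkpos]
    -- A: if s[-2] < mv then 1 else 0 ; B: if count a mv = 1 then 1 else 0
    have hlen2 : 2 ≤ a.length := hk2 (by omega)
    have hslen : s.length = a.length := hperm.length_eq
    have htne : s.dropLast ≠ [] := by
      have hdl : s.dropLast.length = s.length - 1 := by simp
      intro h
      rw [h] at hdl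
      simp at hdl
      omega
    have hsplit : s.dropLast ++ [mv] = s := by
      rw [← hlast_eq]; exact List.dropLast_append_getLast hsne
    have htpw : s.dropLast.Pairwise (· ≤ ·) ∧ ∀ x ∈ s.dropLast, x ≤ mv := by
      have hp2 := hsplit ▸ hpw
      rcases List.pairwise_append.mp hp2 with ⟨h1, _, h3⟩
      exact ⟨h1, fun x hx => h3 x hx mv (by simp)⟩
    have hget2 : PySem.List.pyGetD s (-2) 0 = s.dropLast.getLast htne := by
      rw [PySem.List.pyGetD_neg_ofNat s 2 0 (by omega) (by omega)]
      rw [List.getLast_eq_getElem, List.getElem_dropLast]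
      congr 1
      simp
      omega
    have hcount : a.count mv = s.dropLast.count mv + 1 := by
      rw [← hperm.count_eq, ← hsplit, List.count_append]
      simp
    have hiff : s.dropLast.getLast htne < mv ↔ s.dropLast.count mv = 0 := by
      constructor
      · intro hlt
        rw [List.count_eq_zero]
        intro hmem
        have := pv_last_ge s.dropLast htne htpw.1 mv hmem
        omega
      · intro hz
        have hmem : s.dropLast.getLast htne ∈ s.dropLast := List.getLast_mem htne
        have h1 : s.dropLast.getLast htne ≤ mv := htpw.2 _ hmem
        have h2 : s.dropLast.getLast htne ≠ mv := fun h => by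
          rw [List.count_eq_zero] at hz; exact hz (h ▸ hmem)
        omega
    rw [hget2, PySem.List.count_eq]
    by_cases hc : s.dropLast.count mv = 0
    · have h1 := hiff.mpr hc
      rw [if_pos (by omega), if_pos (by omega)]
    · have h1 : ¬ s.dropLast.getLast htne < mv := fun h => hc (hiff.mp h)
      rw [if_neg (by omega), if_neg (by omega)]
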